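-- pv_equiv track=rewrite | github.com/dnasonov/meet2task | src/meet2task/telegram_bot.py | _ext_from_filename
-- ===== SOURCE A (Python) =====
-- def _ext_from_filename(fname: str) -> str | None:
--     """Расширение по имени файла (нижний регистр)."""
--     if not fname:
--         return None
--     low = fname.lower()
--     for e in (".webm", ".mp3", ".wav", ".m4a", ".ogg", ".flac", ".mp4", ".mpeg", ".mpga"):
--         if low.endswith(e):
--             return e
--     return None
-- ===== SOURCE B (Python) =====
-- _AUDIO_EXTS = frozenset({".webm", ".mp3", ".wav", ".m4a", ".ogg", ".flac", ".mp4", ".mpeg", ".mpga"})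
--
--
-- def _ext_from_filename(fname: str) -> str | None:
--     """Расширение по имени файла (нижний регистр)."""
--     _head, sep, tail = fname.lower().rpartition(".")
--     if not sep:
--         return None
--     ext = "." + tail
--     return ext if ext in _AUDIO_EXTS else None
-- ===== Notes on version B (the rewrite author's own statement) =====
-- stated objective: idiomatic
-- what changed: B replaces A's loop of nine endswith checks by one rpartition extraction of the text after the last dot plus a single frozenset membership test.
import Mathlib
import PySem

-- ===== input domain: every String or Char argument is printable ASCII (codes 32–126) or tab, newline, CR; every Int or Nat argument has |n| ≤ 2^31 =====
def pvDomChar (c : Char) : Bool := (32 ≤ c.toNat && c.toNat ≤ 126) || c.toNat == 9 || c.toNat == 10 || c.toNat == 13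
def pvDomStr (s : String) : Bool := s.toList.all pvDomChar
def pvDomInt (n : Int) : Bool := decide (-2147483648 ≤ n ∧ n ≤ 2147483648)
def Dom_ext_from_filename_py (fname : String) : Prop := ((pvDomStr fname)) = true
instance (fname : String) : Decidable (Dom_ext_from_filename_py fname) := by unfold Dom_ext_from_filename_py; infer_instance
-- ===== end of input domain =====

-- B replaces A's loop of nine endswith checks by one rpartition at the last '.' plus a single
-- frozenset membership test (objective: idiomatic; same cost class).

-- ===== PORT A =====
def pvCands : List String := [".webm", ".mp3", ".wav", ".m4a", ".ogg", ".flac", ".mp4", ".mpeg", ".mpga"]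

def pvFindExt (low : String) : List String → Option String
  | [] => none
  | e :: rest => if PySem.Str.endswith low e then some e else pvFindExt low rest

def ext_from_filename_py (fname : String) : Option String :=
  if fname = "" then none
  else pvFindExt (PySem.Str.lower fname) pvCands

-- ===== PORT B =====
def pvAudioExts : PySem.Set String :=
  PySem.Set.ofList [".webm", ".mp3", ".wav", ".m4a", ".ogg", ".flac", ".mp4", ".mpeg", ".mpga"]

-- hand port of low.rpartition(".") (PySem has no rpartition): tail = the characters after the
-- LAST '.', obtained by takeWhile on the reversed character list; exact for a 1-char separator.
def ext_from_filename_py_alt (fname : String) : Option String :=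
  let r := (PySem.Str.lower fname).toList.reverse
  if r.contains '.' then
    let ext : List Char := '.' :: (r.takeWhile (fun c => c != '.')).reverse
    if pvAudioExts.contains (String.ofList ext) then some (String.ofList ext) else none
  else none

-- ===== PRECONDITION & SPEC =====
def Spec_ext_from_filename_py (fname : String) (out : Option String) : Prop := out = ext_from_filename_py_alt fname
instance (fname : String) (out : Option String) : Decidable (Spec_ext_from_filename_py fname out) := by unfold Spec_ext_from_filename_py; infer_instance

-- ===== CLAIM (what is proved, stated in full; the proofs are below) =====
def Claim_equal_ext_from_filename_py : Prop := ∀ (fname : String), Dom_ext_from_filename_py fname → Spec_ext_from_filename_py fname (ext_from_filename_py fname)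

-- ===== LEMMAS AND PROOFS =====

-- every candidate is '.' followed by a dot-free body
theorem pv_shape (c : String) (hc : c ∈ pvCands) :
    ∃ body : List Char, c.toList = '.' :: body ∧ body.all (fun x => x != '.') = true := by
  simp only [pvCands, List.mem_cons, List.not_mem_nil, or_false] at hc
  rcases hc with rfl|rfl|rfl|rfl|rfl|rfl|rfl|rfl|rfl <;> exact ⟨_, rfl, by decide⟩

theorem pv_take_of_prefix : ∀ (br r : List Char), br.all (fun c => c != '.') = true →
    (br ++ ['.']) <+: r → r.takeWhile (fun c => c != '.') = br := by
  intro br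
  induction br with
  | nil =>
    intro r _ h
    obtain ⟨t, ht⟩ := h
    subst ht; simp
  | cons a br ih =>
    intro r hall h
    obtain ⟨t, ht⟩ := h
    subst ht
    simp only [List.all_cons, Bool.and_eq_true] at hall
    have hih := ih (br ++ '.' :: t) hall.2 ⟨t, by simp⟩
    simp [hall.1, hih]

theorem pv_take_prefix (r : List Char) (h : '.' ∈ r) :
    (r.takeWhile (fun c => c != '.') ++ ['.']) <+: r := by
  induction r with
  | nil => cases h
  | cons a t ih =>
    by_cases ha : a = '.'
    · subst ha; simp [List.takeWhile]
    · have hmem : '.' ∈ t := by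
        rcases List.mem_cons.1 h with h'|h'
        · exact absurd h'.symm ha
        · exact h'
      have : (a != '.') = true := by simpa using ha
      obtain ⟨u, hu⟩ := ih hmem
      exact ⟨u, by simp only [List.takeWhile_cons, this, if_pos]; simpa using hu⟩

-- a candidate is a suffix of l iff its reverse is exactly takeWhile-to-the-first-dot of l.reverse ++ ['.']
theorem pv_match_iff (c : String) (hc : c ∈ pvCands) (l : List Char) (hdot : '.' ∈ l.reverse) :
    (c.toList <:+ l) ↔ c.toList.reverse = l.reverse.takeWhile (fun x => x != '.') ++ ['.'] := by
  obtain ⟨body, hb, hall⟩ := pv_shape c hc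
  constructor
  · intro hsuf
    have hpre : c.toList.reverse <+: l.reverse := List.reverse_prefix.2 hsuf
    rw [hb] at hpre ⊢
    simp only [List.reverse_cons] at hpre ⊢
    have hallr : body.reverse.all (fun x => x != '.') = true := by
      simpa [List.all_eq_true] using hall
    rw [pv_take_of_prefix body.reverse l.reverse hallr hpre]
  · intro heq
    have hpre : c.toList.reverse <+: l.reverse := heq ▸ pv_take_prefix l.reverse hdot
    exact List.reverse_prefix.1 hpre

theorem pv_findExt_none (low : String) : ∀ cs : List String,
    (∀ c ∈ cs, PySem.Str.endswith low c = false) → pvFindExt low cs = none := by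
  intro cs
  induction cs with
  | nil => intro; rfl
  | cons e rest ih =>
    intro h
    show (if PySem.Str.endswith low e = true then some e else pvFindExt low rest) = none
    rw [h e (List.mem_cons_self ..)]
    simp only [Bool.false_eq_true, if_false]
    exact ih fun c hcmem => h c (List.mem_cons_of_mem _ hcmem)

theorem pv_findExt_some (low : String) (t : String) : ∀ cs : List String,
    t ∈ cs → PySem.Str.endswith low t = true →
    (∀ c ∈ cs, PySem.Str.endswith low c = true → c = t) → pvFindExt low cs = some t := by
  intro cs
  induction cs with
  | nil => intro h; cases h
  | cons e rest ih =>
    intro hmem ht huniq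
    show (if PySem.Str.endswith low e = true then some e else pvFindExt low rest) = some t
    by_cases he : PySem.Str.endswith low e = true
    · rw [if_pos he, huniq e (List.mem_cons_self ..) he]
    · rw [if_neg he]
      have hmem' : t ∈ rest := by
        rcases List.mem_cons.1 hmem with rfl|h'
        · exact absurd ht he
        · exact h'
      exact ih hmem' ht fun c hcmem => huniq c (List.mem_cons_of_mem _ hcmem)

theorem pv_endswith_iff (low c : String) :
    PySem.Str.endswith low c = true ↔ c.toList <:+ low.toList := by
  rw [PySem.Str.endswith_eq, PySem.Chars.endswith_iff]

theorem pv_audio_mem (c : String) : pvAudioExts.contains c = true ↔ c ∈ pvCands := by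
  simp [pvAudioExts, pvCands, PySem.Set.ofList]

theorem ext_spec_core (fname : String) :
    pvFindExt (PySem.Str.lower fname) pvCands = ext_from_filename_py_alt fname := by
  set low := PySem.Str.lower fname with hlow
  set l := low.toList with hl
  unfold ext_from_filename_py_alt
  rw [← hlow, ← hl]
  by_cases hdot : '.' ∈ l.reverse
  · rw [if_pos (by simpa using hdot)]
    set ext : List Char := '.' :: (l.reverse.takeWhile (fun c => c != '.')).reverse with hext
    have hextL : (String.ofList ext).toList = ext := String.toList_ofList
    have hextR : (String.ofList ext).toList.reverse =
        l.reverse.takeWhile (fun x => x != '.') ++ ['.'] := by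
      rw [hextL, hext]; simp
    by_cases hE : pvAudioExts.contains (String.ofList ext) = true
    · rw [if_pos hE]
      have hmem : String.ofList ext ∈ pvCands := (pv_audio_mem _).1 hE
      apply pv_findExt_some
      · exact hmem
      · exact (pv_endswith_iff low _).2 ((pv_match_iff _ hmem l hdot).2 hextR)
      · intro c hcmem hc
        have := (pv_match_iff c hcmem l hdot).1 ((pv_endswith_iff low c).1 hc)
        have hrev : c.toList.reverse = (String.ofList ext).toList.reverse := by rw [this, hextR]
        have : c.toList = (String.ofList ext).toList := by
          have := congrArg List.reverse hrev; simpa using this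
        exact String.toList_inj.mp this
    · rw [if_neg hE]
      apply pv_findExt_none
      intro c hcmem
      by_contra hne
      have hc : PySem.Str.endswith low c = true := by
        cases h : PySem.Str.endswith low c
        · exact absurd h hne
        · rfl
      have heq := (pv_match_iff c hcmem l hdot).1 ((pv_endswith_iff low c).1 hc)
      have hcE : c = String.ofList ext := by
        apply String.toList_inj.mp
        have : c.toList.reverse = (String.ofList ext).toList.reverse := by rw [heq, hextR]
        have := congrArg List.reverse this; simpa using this
      exact hE (by rw [← hcE]; exact (pv_audio_mem c).2 hcmem)
  · rw [if_neg (by simpa using hdot)]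
    apply pv_findExt_none
    intro c hcmem
    by_contra hne
    have hc : PySem.Str.endswith low c = true := by
      cases h : PySem.Str.endswith low c
      · exact absurd h hne
      · rfl
    have hsuf : c.toList <:+ l := (pv_endswith_iff low c).1 hc
    obtain ⟨body, hb, -⟩ := pv_shape c hcmem
    have : '.' ∈ l := hsuf.subset (by rw [hb]; exact List.mem_cons_self ..)
    exact hdot (List.mem_reverse.2 this)

-- ===== VERDICT (by name: the statement is the Claim_ definition above) =====
theorem ext_from_filename_py_spec : Claim_equal_ext_from_filename_py := by
  intro fname _
  unfold Spec_ext_from_filename_py ext_from_filename_py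
  by_cases h : fname = ""
  · subst h
    rw [if_pos rfl]
    decide
  · rw [if_neg h]
    exact ext_spec_core fname
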